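-- pv_equiv track=rewrite | github.com/UnpredictablePrashant/Kendr | kendr/domain/deep_research.py | _pick_research_kind
-- ===== SOURCE A (Python) =====
-- _MARKERS: dict[str, set[str]] = {
--     "market": {"market", "competitor", "industry", "pricing", "growth", "customer", "buyer", "seller", "diligence"},
--     "technical": {"technical", "architecture", "system", "platform", "aws", "cloud", "deployment", "integration", "failure", "simulation"},
--     "academic": {"paper", "journal", "study", "citation", "peer", "literature", "academic", "research"},
--     "compliance": {"policy", "regulation", "regulatory", "privacy", "compliance", "legal", "gdpr", "soc2", "iso", "audit"},
--     "codebase": {"code", "repository", "repo", "source", "implementation", "module", "service", "api", "stack", "class", "function"},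
--     "tables": {"table", "spreadsheet", "excel", "xlsx", "xls", "csv", "financial", "forecast", "revenue", "budget", "metrics"},
--     "images": {"image", "diagram", "chart", "slide", "deck", "ppt", "pptx", "screenshot"},
--     "brief": {"brief", "summary", "short", "one-pager"},
--     "report": {"report", "research", "whitepaper", "guide", "handbook"},
--     "memo": {"memo", "note"},
--     "comparison": {"compare", "comparison", "versus", "vs"},
--     "diligence_pack": {"diligence", "investment", "due", "acquisition"},
--     "high_stakes": {"medical", "legal", "compliance", "regulation", "financial", "security", "privacy"},
-- }
--
-- def _score_markers(tokens: set[str], marker_key: str) -> int: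
--     markers = _MARKERS.get(marker_key, set())
--     return len(tokens & markers)
--
-- def _pick_research_kind(tokens: set[str]) -> tuple[str, list[str]]:
--     scores = {
--         "market": _score_markers(tokens, "market"),
--         "technical": _score_markers(tokens, "technical"),
--         "academic": _score_markers(tokens, "academic"),
--         "compliance": _score_markers(tokens, "compliance"),
--         "codebase": _score_markers(tokens, "codebase"),
--     }
--     non_zero = [kind for kind, score in scores.items() if score > 0]
--     if len(non_zero) >= 2:
--         return "mixed", non_zero
--     if non_zero:
--         return non_zero[0], non_zero
--     return "market", []
-- ===== SOURCE B (Python) =====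
-- _KIND_ORDER = ["market", "technical", "academic", "compliance", "codebase"]
--
-- _KIND_MARKERS = {
--     "market": {"market", "competitor", "industry", "pricing", "growth", "customer", "buyer", "seller", "diligence"},
--     "technical": {"technical", "architecture", "system", "platform", "aws", "cloud", "deployment", "integration", "failure", "simulation"},
--     "academic": {"paper", "journal", "study", "citation", "peer", "literature", "academic", "research"},
--     "compliance": {"policy", "regulation", "regulatory", "privacy", "compliance", "legal", "gdpr", "soc2", "iso", "audit"},
--     "codebase": {"code", "repository", "repo", "source", "implementation", "module", "service", "api", "stack", "class", "function"},
-- }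
--
-- # inverted index: marker word -> its (unique) research kind
-- _WORD_KIND = {w: k for k in _KIND_ORDER for w in _KIND_MARKERS[k]}
--
--
-- def _pick_research_kind(tokens):
--     hits = set()
--     for t in tokens:
--         k = _WORD_KIND.get(t)
--         if k is not None:
--             hits.add(k)
--     non_zero = [k for k in _KIND_ORDER if k in hits]
--     if len(non_zero) >= 2:
--         return "mixed", non_zero
--     if non_zero:
--         return non_zero[0], non_zero
--     return "market", []
-- ===== Notes on version B (the rewrite author's own statement) =====
-- stated objective: alternative
-- what changed: Replaces the five per-category set intersections with a single pass over the tokens through a precomputed word-to-category inverted index collecting a hit-set, then filters the fixed category order by that set.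
import Mathlib
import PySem

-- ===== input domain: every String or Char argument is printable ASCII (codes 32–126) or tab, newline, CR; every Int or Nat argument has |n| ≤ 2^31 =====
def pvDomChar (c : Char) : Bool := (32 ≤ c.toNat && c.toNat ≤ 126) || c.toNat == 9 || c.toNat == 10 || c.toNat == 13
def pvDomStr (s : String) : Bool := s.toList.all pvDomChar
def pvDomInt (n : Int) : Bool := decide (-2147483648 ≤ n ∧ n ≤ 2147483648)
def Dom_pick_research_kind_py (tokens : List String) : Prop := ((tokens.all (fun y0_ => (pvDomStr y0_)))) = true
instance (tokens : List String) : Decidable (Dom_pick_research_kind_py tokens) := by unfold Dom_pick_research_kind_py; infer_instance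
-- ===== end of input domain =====

-- B replaces A's five per-category set intersections by one pass over the tokens through an
-- inverted word→category index collecting a hit-set (objective: alternative decomposition).

-- ===== PORT A =====
-- _MARKERS (dict of string sets → assoc list whose values are distinct-element lists, insertion order)
def pvMARKERS : PySem.Dict String (List String) := PySem.Dict.ofList [
    ("market", ["market", "competitor", "industry", "pricing", "growth", "customer", "buyer", "seller", "diligence"]),
    ("technical", ["technical", "architecture", "system", "platform", "aws", "cloud", "deployment", "integration", "failure", "simulation"]),
    ("academic", ["paper", "journal", "study", "citation", "peer", "literature", "academic", "research"]),
    ("compliance", ["policy", "regulation", "regulatory", "privacy", "compliance", "legal", "gdpr", "soc2", "iso", "audit"]),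
    ("codebase", ["code", "repository", "repo", "source", "implementation", "module", "service", "api", "stack", "class", "function"]),
    ("tables", ["table", "spreadsheet", "excel", "xlsx", "xls", "csv", "financial", "forecast", "revenue", "budget", "metrics"]),
    ("images", ["image", "diagram", "chart", "slide", "deck", "ppt", "pptx", "screenshot"]),
    ("brief", ["brief", "summary", "short", "one-pager"]),
    ("report", ["report", "research", "whitepaper", "guide", "handbook"]),
    ("memo", ["memo", "note"]),
    ("comparison", ["compare", "comparison", "versus", "vs"]),
    ("diligence_pack", ["diligence", "investment", "due", "acquisition"]),
    ("high_stakes", ["medical", "legal", "compliance", "regulation", "financial", "security", "privacy"])]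

-- _score_markers(tokens, marker_key) = len(tokens & _MARKERS.get(marker_key, set()))
def score_markers_py (tokens : List String) (marker_key : String) : Int :=
  PySem.Set.len (PySem.Set.inter tokens (pvMARKERS.getD marker_key []))

def pick_research_kind_py (tokens : List String) : String × List String :=
  let scores : PySem.Dict String Int := PySem.Dict.ofList [
    ("market", score_markers_py tokens "market"),
    ("technical", score_markers_py tokens "technical"),
    ("academic", score_markers_py tokens "academic"),
    ("compliance", score_markers_py tokens "compliance"),
    ("codebase", score_markers_py tokens "codebase")]
  let non_zero := (scores.items.filter (fun p => decide (0 < p.2))).map (fun p => p.1)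
  if 2 ≤ non_zero.length then ("mixed", non_zero)
  else
    match non_zero with         -- non_zero[0] on the nonempty branch
    | k :: _ => (k, non_zero)
    | [] => ("market", [])

-- ===== PORT B =====
-- _KIND_ORDER
def pvKindOrder : List String := ["market", "technical", "academic", "compliance", "codebase"]

-- _KIND_MARKERS (B's own copy of the five relevant marker sets)
def pvKindMarkers : PySem.Dict String (List String) := PySem.Dict.ofList [
    ("market", ["market", "competitor", "industry", "pricing", "growth", "customer", "buyer", "seller", "diligence"]),
    ("technical", ["technical", "architecture", "system", "platform", "aws", "cloud", "deployment", "integration", "failure", "simulation"]),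
    ("academic", ["paper", "journal", "study", "citation", "peer", "literature", "academic", "research"]),
    ("compliance", ["policy", "regulation", "regulatory", "privacy", "compliance", "legal", "gdpr", "soc2", "iso", "audit"]),
    ("codebase", ["code", "repository", "repo", "source", "implementation", "module", "service", "api", "stack", "class", "function"])]

-- _WORD_KIND: inverted index, marker word → its kind (comprehension over _KIND_ORDER, then that kind's words)
def pvWordKind : PySem.Dict String String := PySem.Dict.ofList (
  pvKindOrder.flatMap (fun k => (pvKindMarkers.getD k []).map (fun w => (w, k))))

def pick_research_kind_py_alt (tokens : List String) : String × List String :=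
  let hits : PySem.Set String := tokens.foldl (fun s t =>
    match pvWordKind.get? t with
    | some k => PySem.Set.add s k
    | none => s) PySem.Set.empty
  let non_zero := pvKindOrder.filter (fun k => PySem.Set.contains hits k)
  if 2 ≤ non_zero.length then ("mixed", non_zero)
  else
    match non_zero with
    | k :: _ => (k, non_zero)
    | [] => ("market", [])

-- ===== PRECONDITION & SPEC =====
def Spec_pick_research_kind_py (tokens : List String) (out : String × List String) : Prop := out = pick_research_kind_py_alt tokens
instance (tokens : List String) (out : String × List String) : Decidable (Spec_pick_research_kind_py tokens out) := by unfold Spec_pick_research_kind_py; infer_instance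

-- ===== CLAIM (what is proved, stated in full; the proofs are below) =====
def Claim_equal_pick_research_kind_py : Prop := ∀ (tokens : List String), Dom_pick_research_kind_py tokens → Spec_pick_research_kind_py tokens (pick_research_kind_py tokens)

-- ===== LEMMAS AND PROOFS =====

-- find? over one category block of the inverted index
lemma find?_block (ws : List String) (k t : String) :
    List.find? (fun p => p.1 == t) (ws.map (fun w => (w, k))) = if t ∈ ws then some (t, k) else none := by
  induction ws with
  | nil => simp
  | cons w ws ih =>
      by_cases hw : w = t
      · subst hw; simp
      · rw [List.map_cons, List.find?_cons_of_neg (by simp [hw]), ih]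
        simp only [List.mem_cons]
        split_ifs with h1 h2 h2 <;> simp_all [eq_comm]

-- the inverted index, looked up at any string, answers by the first of the five marker lists containing it
set_option maxRecDepth 4096 in
lemma get?_pvWordKind (t : String) :
    pvWordKind.get? t = (if t ∈ pvMARKERS.getD "market" [] then some "market" else if t ∈ pvMARKERS.getD "technical" [] then some "technical" else if t ∈ pvMARKERS.getD "academic" [] then some "academic" else if t ∈ pvMARKERS.getD "compliance" [] then some "compliance" else if t ∈ pvMARKERS.getD "codebase" [] then some "codebase" else none) := by
  have h : pvWordKind.items = (["market", "competitor", "industry", "pricing", "growth", "customer", "buyer", "seller", "diligence"].map (fun w => (w, "market"))) ++ (["technical", "architecture", "system", "platform", "aws", "cloud", "deployment", "integration", "failure", "simulation"].map (fun w => (w, "technical"))) ++ (["paper", "journal", "study", "citation", "peer", "literature", "academic", "research"].map (fun w => (w, "academic"))) ++ (["policy", "regulation", "regulatory", "privacy", "compliance", "legal", "gdpr", "soc2", "iso", "audit"].map (fun w => (w, "compliance"))) ++ (["code", "repository", "repo", "source", "implementation", "module", "service", "api", "stack", "class", "function"].map (fun w => (w, "codebase"))) := by decide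
  have h_market : pvMARKERS.getD "market" [] = ["market", "competitor", "industry", "pricing", "growth", "customer", "buyer", "seller", "diligence"] := by decide
  have h_technical : pvMARKERS.getD "technical" [] = ["technical", "architecture", "system", "platform", "aws", "cloud", "deployment", "integration", "failure", "simulation"] := by decide
  have h_academic : pvMARKERS.getD "academic" [] = ["paper", "journal", "study", "citation", "peer", "literature", "academic", "research"] := by decide
  have h_compliance : pvMARKERS.getD "compliance" [] = ["policy", "regulation", "regulatory", "privacy", "compliance", "legal", "gdpr", "soc2", "iso", "audit"] := by decide
  have h_codebase : pvMARKERS.getD "codebase" [] = ["code", "repository", "repo", "source", "implementation", "module", "service", "api", "stack", "class", "function"] := by decide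
  rw [h_market, h_technical, h_academic, h_compliance, h_codebase]
  simp only [PySem.Dict.get?, h, List.find?_append, find?_block]
  split_ifs <;> simp

-- membership in the hit-set accumulated by B's fold
set_option maxRecDepth 4096 in
lemma mem_hits (tokens : List String) (s : PySem.Set String) (c : String) :
    (c ∈ tokens.foldl (fun s t =>
      match pvWordKind.get? t with
      | some k => PySem.Set.add s k
      | none => s) s) ↔ c ∈ s ∨ ∃ t ∈ tokens, pvWordKind.get? t = some c := by
  induction tokens generalizing s with
  | nil => simp
  | cons x xs ih =>
      simp only [List.foldl_cons, ih, List.mem_cons]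
      cases h : pvWordKind.get? x <;>
        (simp [PySem.Set.mem_add, h]; try tauto)

-- A's score is positive iff some token is a marker of that kind
lemma score_pos_iff (tokens : List String) (k : String) :
    (0 < score_markers_py tokens k) ↔ ∃ t ∈ tokens, t ∈ pvMARKERS.getD k [] := by
  simp [score_markers_py, PySem.Set.len, PySem.Set.inter, List.length_pos_iff_exists_mem]

-- for the five kinds, the inverted index hits k at t iff t is one of k's markers
set_option maxRecDepth 4096 in
lemma get?_eq_some_iff (t k : String) (hk : k ∈ pvKindOrder) :
    pvWordKind.get? t = some k ↔ t ∈ pvMARKERS.getD k [] := by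
  have h_market : pvMARKERS.getD "market" [] = ["market", "competitor", "industry", "pricing", "growth", "customer", "buyer", "seller", "diligence"] := by decide
  have h_technical : pvMARKERS.getD "technical" [] = ["technical", "architecture", "system", "platform", "aws", "cloud", "deployment", "integration", "failure", "simulation"] := by decide
  have h_academic : pvMARKERS.getD "academic" [] = ["paper", "journal", "study", "citation", "peer", "literature", "academic", "research"] := by decide
  have h_compliance : pvMARKERS.getD "compliance" [] = ["policy", "regulation", "regulatory", "privacy", "compliance", "legal", "gdpr", "soc2", "iso", "audit"] := by decide
  have h_codebase : pvMARKERS.getD "codebase" [] = ["code", "repository", "repo", "source", "implementation", "module", "service", "api", "stack", "class", "function"] := by decide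
  have d_market_technical : ∀ t, t ∈ ["market", "competitor", "industry", "pricing", "growth", "customer", "buyer", "seller", "diligence"] → t ∉ ["technical", "architecture", "system", "platform", "aws", "cloud", "deployment", "integration", "failure", "simulation"] := by decide
  have d_market_academic : ∀ t, t ∈ ["market", "competitor", "industry", "pricing", "growth", "customer", "buyer", "seller", "diligence"] → t ∉ ["paper", "journal", "study", "citation", "peer", "literature", "academic", "research"] := by decide
  have d_technical_academic : ∀ t, t ∈ ["technical", "architecture", "system", "platform", "aws", "cloud", "deployment", "integration", "failure", "simulation"] → t ∉ ["paper", "journal", "study", "citation", "peer", "literature", "academic", "research"] := by decide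
  have d_market_compliance : ∀ t, t ∈ ["market", "competitor", "industry", "pricing", "growth", "customer", "buyer", "seller", "diligence"] → t ∉ ["policy", "regulation", "regulatory", "privacy", "compliance", "legal", "gdpr", "soc2", "iso", "audit"] := by decide
  have d_technical_compliance : ∀ t, t ∈ ["technical", "architecture", "system", "platform", "aws", "cloud", "deployment", "integration", "failure", "simulation"] → t ∉ ["policy", "regulation", "regulatory", "privacy", "compliance", "legal", "gdpr", "soc2", "iso", "audit"] := by decide
  have d_academic_compliance : ∀ t, t ∈ ["paper", "journal", "study", "citation", "peer", "literature", "academic", "research"] → t ∉ ["policy", "regulation", "regulatory", "privacy", "compliance", "legal", "gdpr", "soc2", "iso", "audit"] := by decide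
  have d_market_codebase : ∀ t, t ∈ ["market", "competitor", "industry", "pricing", "growth", "customer", "buyer", "seller", "diligence"] → t ∉ ["code", "repository", "repo", "source", "implementation", "module", "service", "api", "stack", "class", "function"] := by decide
  have d_technical_codebase : ∀ t, t ∈ ["technical", "architecture", "system", "platform", "aws", "cloud", "deployment", "integration", "failure", "simulation"] → t ∉ ["code", "repository", "repo", "source", "implementation", "module", "service", "api", "stack", "class", "function"] := by decide
  have d_academic_codebase : ∀ t, t ∈ ["paper", "journal", "study", "citation", "peer", "literature", "academic", "research"] → t ∉ ["code", "repository", "repo", "source", "implementation", "module", "service", "api", "stack", "class", "function"] := by decide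
  have d_compliance_codebase : ∀ t, t ∈ ["policy", "regulation", "regulatory", "privacy", "compliance", "legal", "gdpr", "soc2", "iso", "audit"] → t ∉ ["code", "repository", "repo", "source", "implementation", "module", "service", "api", "stack", "class", "function"] := by decide
  fin_cases hk
  · rw [get?_pvWordKind, h_market, h_technical, h_academic, h_compliance, h_codebase]
    split_ifs with h1 h2 h3 h4 h5
    · exact iff_of_true rfl h1
    · exact iff_of_false (by simp) h1
    · exact iff_of_false (by simp) h1
    · exact iff_of_false (by simp) h1
    · exact iff_of_false (by simp) h1
    · exact iff_of_false (by simp) h1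
  · rw [get?_pvWordKind, h_market, h_technical, h_academic, h_compliance, h_codebase]
    split_ifs with h1 h2 h3 h4 h5
    · exact iff_of_false (by simp) (d_market_technical t h1)
    · exact iff_of_true rfl h2
    · exact iff_of_false (by simp) h2
    · exact iff_of_false (by simp) h2
    · exact iff_of_false (by simp) h2
    · exact iff_of_false (by simp) h2
  · rw [get?_pvWordKind, h_market, h_technical, h_academic, h_compliance, h_codebase]
    split_ifs with h1 h2 h3 h4 h5
    · exact iff_of_false (by simp) (d_market_academic t h1)
    · exact iff_of_false (by simp) (d_technical_academic t h2)
    · exact iff_of_true rfl h3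
    · exact iff_of_false (by simp) h3
    · exact iff_of_false (by simp) h3
    · exact iff_of_false (by simp) h3
  · rw [get?_pvWordKind, h_market, h_technical, h_academic, h_compliance, h_codebase]
    split_ifs with h1 h2 h3 h4 h5
    · exact iff_of_false (by simp) (d_market_compliance t h1)
    · exact iff_of_false (by simp) (d_technical_compliance t h2)
    · exact iff_of_false (by simp) (d_academic_compliance t h3)
    · exact iff_of_true rfl h4
    · exact iff_of_false (by simp) h4
    · exact iff_of_false (by simp) h4
  · rw [get?_pvWordKind, h_market, h_technical, h_academic, h_compliance, h_codebase]
    split_ifs with h1 h2 h3 h4 h5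
    · exact iff_of_false (by simp) (d_market_codebase t h1)
    · exact iff_of_false (by simp) (d_technical_codebase t h2)
    · exact iff_of_false (by simp) (d_academic_codebase t h3)
    · exact iff_of_false (by simp) (d_compliance_codebase t h4)
    · exact iff_of_true rfl h5
    · exact iff_of_false (by simp) h5

set_option maxRecDepth 4096 in
theorem pick_research_kind_py_spec_aux (tokens : List String) :
    pick_research_kind_py tokens = pick_research_kind_py_alt tokens := by
  simp only [pick_research_kind_py, pick_research_kind_py_alt]
  have hitems : (PySem.Dict.ofList [
      ("market", score_markers_py tokens "market"),
      ("technical", score_markers_py tokens "technical"),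
      ("academic", score_markers_py tokens "academic"),
      ("compliance", score_markers_py tokens "compliance"),
      ("codebase", score_markers_py tokens "codebase")]).items
      = pvKindOrder.map (fun k => (k, score_markers_py tokens k)) := rfl
  rw [hitems]
  have hnz : ((pvKindOrder.map (fun k => (k, score_markers_py tokens k))).filter
        (fun p => decide (0 < p.2))).map (fun p => p.1)
      = pvKindOrder.filter (fun k => PySem.Set.contains (tokens.foldl (fun s t =>
          match pvWordKind.get? t with
          | some k => PySem.Set.add s k
          | none => s) PySem.Set.empty) k) := by
    rw [List.filter_map, List.map_map]
    have hid : ((fun p => p.1) ∘ fun k => (k, score_markers_py tokens k)) = id := rfl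
    rw [hid, List.map_id]
    refine List.filter_congr ?_
    intro k hk
    simp only [Function.comp]
    rw [Bool.eq_iff_iff, decide_eq_true_iff, PySem.Set.contains_iff, mem_hits,
      score_pos_iff]
    simp only [PySem.Set.empty, List.not_mem_nil, false_or]
    exact exists_congr fun t => and_congr_right fun _ => (get?_eq_some_iff t k hk).symm
  rw [hnz]

-- ===== VERDICT (by name: the statement is the Claim_ definition above) =====
theorem pick_research_kind_py_spec : Claim_equal_pick_research_kind_py := by
  intro tokens _
  unfold Spec_pick_research_kind_py
  exact pick_research_kind_py_spec_aux tokens
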